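-- pv_equiv track=rewrite | github.com/MinTreesLearn/ML | Codeforces Submissions/1323/B/171032052.py | f
-- ===== SOURCE A (Python) =====
-- def f(x, w, nw):
--
--     if x > nw:
--
--         return 0
--
--     s1 = w[:x].count('1')
--
--     c = 0
--
--     if s1 == x:
--
--         c += 1
--
--     for i in range(nw-x):
--
--         if w[i] == '1':
--
--             s1 -= 1
--
--         if w[i+x] == '1':
--
--             s1 += 1
--
--         if s1 == x:
--
--             c += 1
--
--     return c
-- ===== SOURCE B (Python) =====
-- def f(x, w, nw):
--     if x > nw:
--         return 0
--     total = 0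
--     run = 0
--     for ch in w[:nw]:
--         if ch == '1':
--             run += 1
--         else:
--             if run >= x:
--                 total += run - x + 1
--             run = 0
--     if run >= x:
--         total += run - x + 1
--     return total
-- ===== Notes on version B (the rewrite author's own statement) =====
-- stated objective: alternative
-- what changed: B replaces A's sliding-window count maintenance (prefix count plus one index-based add/subtract step per shift) by a single pass over w[:nw] that finds maximal runs of '1' and adds the closed-form max(0, L - x + 1) windows per run.
-- outside the precondition, e.g. on f(-2, '1000', 0): A returns 0, B returns 3
import Mathlib
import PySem

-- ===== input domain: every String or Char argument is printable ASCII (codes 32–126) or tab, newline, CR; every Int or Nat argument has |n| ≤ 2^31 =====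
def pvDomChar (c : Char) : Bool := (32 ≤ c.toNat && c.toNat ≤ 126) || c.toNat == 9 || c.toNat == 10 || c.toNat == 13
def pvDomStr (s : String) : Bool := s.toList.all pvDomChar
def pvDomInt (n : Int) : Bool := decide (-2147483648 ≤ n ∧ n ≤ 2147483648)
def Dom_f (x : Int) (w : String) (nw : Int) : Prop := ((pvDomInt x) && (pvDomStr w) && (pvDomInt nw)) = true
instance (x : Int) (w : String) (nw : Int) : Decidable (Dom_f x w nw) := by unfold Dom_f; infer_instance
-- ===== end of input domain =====

-- B counts all-ones windows per maximal run of '1's with a closed form instead of A's sliding-window bookkeeping (alternative decomposition, same O(nw) cost).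


-- ===== PORT A =====
def f (x : Int) (w : String) (nw : Int) : Int :=
  if x > nw then 0
  else
    let s1 : Int := (PySem.Chars.count (PySem.List.slice w.toList none (some x)) ['1'] : Int)
    let c : Int := 0
    let c : Int := if s1 = x then c + 1 else c
    let r := (PySem.List.pyRange 0 (nw - x) 1).foldl
      (fun (st : Int × Int) i =>
        let s1 := if PySem.List.pyGetD w.toList i ' ' = '1' then st.1 - 1 else st.1
        let s1 := if PySem.List.pyGetD w.toList (i + x) ' ' = '1' then s1 + 1 else s1
        let c  := if s1 = x then st.2 + 1 else st.2
        (s1, c)) (s1, c)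
    r.2

-- ===== PORT B =====
def f_alt (x : Int) (w : String) (nw : Int) : Int :=
  if x > nw then 0
  else
    let r := (PySem.List.slice w.toList none (some nw)).foldl
      (fun (st : Int × Int) ch =>
        if ch = '1' then (st.1, st.2 + 1)
        else (if st.2 ≥ x then st.1 + (st.2 - x + 1) else st.1, (0 : Int)))
      (0, 0)
    if r.2 ≥ x then r.1 + (r.2 - x + 1) else r.1

-- ===== PRECONDITION & SPEC =====
-- Pre_ excludes non-positive window lengths x ≤ nw (degenerate inputs outside the problem's
-- x ≥ 1 domain, on which A's bookkeeping returns accidental values via Python negative-index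
-- wraparound and empty-slice counting) and inputs with x < nw but nw > len(w), on which A
-- raises IndexError.
def Pre_f (x : Int) (w : String) (nw : Int) : Prop :=
  (1 ≤ x ∨ nw < x) ∧ (x < nw → nw ≤ (w.toList.length : Int))
instance (x : Int) (w : String) (nw : Int) : Decidable (Pre_f x w nw) := by unfold Pre_f; infer_instance
def pvWitness_f : Int × String × Int := (2, "11011", 5)

def Spec_f (x : Int) (w : String) (nw : Int) (out : Int) : Prop := out = f_alt x w nw
instance (x : Int) (w : String) (nw : Int) (out : Int) : Decidable (Spec_f x w nw out) := by unfold Spec_f; infer_instance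

-- ===== CLAIM (what is proved, stated in full; the proofs are below) =====
def Claim_equal_f : Prop := ∀ (x : Int) (w : String) (nw : Int), Dom_f x w nw → Pre_f x w nw → Spec_f x w nw (f x w nw)

-- ===== LEMMAS AND PROOFS =====

-- number of '1's in the window of length k starting at position j of l
def wc (l : List Char) (k j : Nat) : Nat := ((l.drop j).take k).count '1'

-- number of all-ones windows of length k inside l (count-based predicate)
def G (l : List Char) (k : Nat) : Nat :=
  (List.range (l.length + 1 - k)).countP (fun j => wc l k j = k)

theorem chars_count_go_singleton (c : Char) (fuel : Nat) (l : List Char) (acc : Nat)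
    (h : l.length ≤ fuel) : PySem.Chars.count.go [c] fuel l acc = acc + l.count c := by
  induction fuel generalizing l acc with
  | zero =>
    cases l with
    | nil => simp [PySem.Chars.count.go]
    | cons a t => simp at h
  | succ n ih =>
    cases l with
    | nil => simp [PySem.Chars.count.go]
    | cons a t =>
      simp only [List.length_cons] at h
      rw [PySem.Chars.count.go]
      by_cases hc : c = a
      · subst hc
        simp [List.isPrefixOf, ih t _ (by omega)]
        omega
      · simp [List.isPrefixOf, Ne.symm hc, hc, ih t _ (by omega)]

theorem chars_count_singleton (l : List Char) (c : Char) :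
    PySem.Chars.count l [c] = l.count c := by
  rw [PySem.Chars.count]
  simp [chars_count_go_singleton c l.length l 0 le_rfl]

-- window shift: one step of A's sliding update
theorem wc_shift (l : List Char) (k j : Nat) (hk : 1 ≤ k) (h : j + k < l.length) :
    (wc l k (j+1) : Int)
      = (wc l k j : Int) - (if l.getD j ' ' = '1' then 1 else 0)
        + (if l.getD (j+k) ' ' = '1' then 1 else 0) := by
  obtain ⟨k', rfl⟩ : ∃ k', k = k' + 1 := ⟨k - 1, by omega⟩
  have hj : j < l.length := by omega
  have hdj : l.drop j = l[j] :: l.drop (j+1) := List.drop_eq_getElem_cons hj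
  have hlen : k' < (l.drop (j+1)).length := by simp; omega
  have htake : (l.drop (j+1)).take (k'+1) = (l.drop (j+1)).take k' ++ [(l.drop (j+1))[k']] := by
    rw [List.take_add_one]
    simp [List.getElem?_eq_getElem hlen]
  have hget : (l.drop (j+1))[k']'hlen = l[j+1+k']'(by omega) := by simp
  have hgd1 : l.getD j ' ' = l[j] := List.getD_eq_getElem l ' ' hj
  have hgd2 : l.getD (j + (k'+1)) ' ' = l[j+1+k']'(by omega) := by
    rw [List.getD_eq_getElem l ' ' (by omega)]
    congr 1
    omega
  unfold wc
  rw [hdj, List.take_succ_cons, htake, hgd1, hgd2, ← hget]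
  rw [List.count_cons, List.count_append]
  simp only [List.count_singleton]
  push_cast
  split_ifs with h1 h2 h2 <;> simp_all

theorem G_cons (a : Char) (t : List Char) (k : Nat) :
    G (a :: t) k
      = (if k ≤ t.length + 1 ∧ (List.take k (a :: t)).count '1' = k then 1 else 0) + G t k := by
  unfold G
  by_cases hle : k ≤ t.length + 1
  · have h1 : (a :: t).length + 1 - k = (t.length + 1 - k) + 1 := by simp; omega
    rw [h1, List.range_succ_eq_map, List.countP_cons, List.countP_map]
    have h2 : List.countP ((fun j => decide (wc (a :: t) k j = k)) ∘ Nat.succ)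
        (List.range (t.length + 1 - k)) = List.countP (fun j => decide (wc t k j = k))
        (List.range (t.length + 1 - k)) :=
      List.countP_congr (by intro j _; simp [wc, Function.comp])
    rw [h2]
    have h3 : wc (a :: t) k 0 = (List.take k (a :: t)).count '1' := by simp [wc]
    simp only [h3, hle, true_and]
    by_cases hc : (List.take k (a :: t)).count '1' = k <;> simp [hc] <;> omega
  · have h1 : (a :: t).length + 1 - k = 0 := by simp; omega
    have h2 : t.length + 1 - k = 0 := by omega
    rw [h1, h2]
    simp [hle]

theorem G_replicate (r k : Nat) : G (List.replicate r '1') k = r + 1 - k := by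
  unfold G
  simp only [List.length_replicate]
  have h : ∀ j ∈ List.range (r + 1 - k), wc (List.replicate r '1') k j = k := by
    intro j hj
    simp only [List.mem_range] at hj
    unfold wc
    rw [List.drop_replicate, List.take_replicate, List.count_replicate]
    simp
    omega
  calc (List.range (r + 1 - k)).countP (fun j => wc (List.replicate r '1') k j = k)
      = (List.range (r + 1 - k)).length := List.countP_eq_length.mpr (by
        intro j hj; simpa using h j hj)
    _ = r + 1 - k := List.length_range

theorem count_take_lt (c : Char) (t : List Char) (m : Nat) (hc : c ≠ '1') (hm : 1 ≤ m) :
    (List.take m (c :: t)).count '1' < m := by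
  obtain ⟨m', rfl⟩ : ∃ m', m = m' + 1 := ⟨m - 1, by omega⟩
  rw [List.take_succ_cons, List.count_cons]
  simp [hc]
  have := List.count_le_length (l := List.take m' t) (a := '1')
  have := List.length_take_le m' t
  omega

-- run split: an all-ones run of length r followed by a non-'1' char
theorem G_run_split (r : Nat) (c : Char) (t : List Char) (k : Nat) (hk : 1 ≤ k) (hc : c ≠ '1') :
    G (List.replicate r '1' ++ c :: t) k = (r + 1 - k) + G t k := by
  induction r with
  | zero =>
    simp only [List.replicate_zero, List.nil_append]
    rw [G_cons c t k]
    have := count_take_lt c t k hc hk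
    have hnk : ¬ ((List.take k (c :: t)).count '1' = k) := by omega
    have hz : 0 + 1 - k = 0 := by omega
    simp only [hnk, and_false, if_false, hz]
  | succ r ih =>
    have hrw : List.replicate (r+1) '1' ++ c :: t = '1' :: (List.replicate r '1' ++ c :: t) := by
      simp [List.replicate_succ]
    rw [hrw, G_cons _ _ k, ih]
    have hlen : (List.replicate r '1' ++ c :: t).length = r + 1 + t.length := by simp; omega
    by_cases hkr : k ≤ r + 1
    · have hcnt : (List.take k ('1' :: (List.replicate r '1' ++ c :: t))).count '1' = k := by
        rw [← hrw, List.take_append_of_le_length (by simp; omega), List.take_replicate,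
          List.count_replicate]
        simp
        omega
      have hle2 : k ≤ (List.replicate r '1' ++ c :: t).length + 1 := by simp; omega
      rw [if_pos (⟨hle2, hcnt⟩ : _ ∧ _)]
      omega
    · have hcnt : (List.take k ('1' :: (List.replicate r '1' ++ c :: t))).count '1' < k := by
        rw [← hrw, List.take_append, List.take_replicate, List.count_append,
          List.count_replicate]
        have h1 := count_take_lt c t (k - (List.replicate (r+1) '1').length) hc
          (by simp; omega)
        simp only [List.length_replicate] at h1 ⊢
        simp
        omega
      have hnk : ¬ ((List.take k ('1' :: (List.replicate r '1' ++ c :: t))).count '1' = k) := by omega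
      simp only [hnk, and_false, if_false]
      omega

-- short input: at most one candidate window
theorem G_short (u : List Char) (k : Nat) (hu : u.length ≤ k) :
    G u k = if u.count '1' = k then 1 else 0 := by
  unfold G
  by_cases he : u.length = k
  · have h1 : u.length + 1 - k = 1 := by omega
    rw [h1]
    have h2 : wc u k 0 = u.count '1' := by
      unfold wc
      rw [List.drop_zero, List.take_of_length_le hu]
    simp [h2]
  · have h1 : u.length + 1 - k = 0 := by omega
    have hlt := List.count_le_length (l := u) (a := '1')
    have hnk : ¬ (u.count '1' = k) := by omega
    rw [h1]
    simp [hnk]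

-- B's fold with a pending run of `run` ones already seen
theorem B_run (k : Nat) (hk : 1 ≤ k) (t : List Char) :
    ∀ (run : Nat) (total : Int),
    (if (t.foldl (fun (st : Int × Int) ch =>
          if ch = '1' then (st.1, st.2 + 1)
          else (if st.2 ≥ (k : Int) then st.1 + (st.2 - (k : Int) + 1) else st.1, (0 : Int)))
          (total, (run : Int))).2 ≥ (k : Int)
     then (t.foldl (fun (st : Int × Int) ch =>
          if ch = '1' then (st.1, st.2 + 1)
          else (if st.2 ≥ (k : Int) then st.1 + (st.2 - (k : Int) + 1) else st.1, (0 : Int)))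
          (total, (run : Int))).1
        + ((t.foldl (fun (st : Int × Int) ch =>
          if ch = '1' then (st.1, st.2 + 1)
          else (if st.2 ≥ (k : Int) then st.1 + (st.2 - (k : Int) + 1) else st.1, (0 : Int)))
          (total, (run : Int))).2 - (k : Int) + 1)
     else (t.foldl (fun (st : Int × Int) ch =>
          if ch = '1' then (st.1, st.2 + 1)
          else (if st.2 ≥ (k : Int) then st.1 + (st.2 - (k : Int) + 1) else st.1, (0 : Int)))
          (total, (run : Int))).1)
      = total + ((G (List.replicate run '1' ++ t) k : Nat) : Int) := by
  induction t with
  | nil =>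
    intro run total
    simp only [List.foldl_nil, List.append_nil, G_replicate]
    by_cases h : (run : Int) ≥ (k : Int)
    · rw [if_pos h]
      have : ((run + 1 - k : Nat) : Int) = (run : Int) - (k : Int) + 1 := by omega
      rw [this]
    · rw [if_neg h]
      have : ((run + 1 - k : Nat) : Int) = 0 := by omega
      rw [this, add_zero]
  | cons ch t' ih =>
    intro run total
    by_cases hc : ch = '1'
    · subst hc
      have hstep : (if ('1' : Char) = '1' then ((total, (run : Int)).1, (total, (run : Int)).2 + 1)
          else (if (total, (run : Int)).2 ≥ (k : Int)
                then (total, (run : Int)).1 + ((total, (run : Int)).2 - (k : Int) + 1)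
                else (total, (run : Int)).1, (0 : Int)))
          = (total, ((run + 1 : Nat) : Int)) := by norm_num
      rw [List.foldl_cons, hstep, ih (run + 1) total]
      have : List.replicate (run + 1) '1' ++ t' = List.replicate run '1' ++ '1' :: t' := by
        rw [List.replicate_succ']
        simp
      rw [this]
    · have hstep : (if ch = '1' then ((total, (run : Int)).1, (total, (run : Int)).2 + 1)
          else (if (total, (run : Int)).2 ≥ (k : Int)
                then (total, (run : Int)).1 + ((total, (run : Int)).2 - (k : Int) + 1)
                else (total, (run : Int)).1, (0 : Int)))
          = ((if (run : Int) ≥ (k : Int) then total + ((run : Int) - (k : Int) + 1) else total),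
             ((0 : Nat) : Int)) := by
        rw [if_neg hc]
        norm_num
      rw [List.foldl_cons, hstep,
        ih 0 (if (run : Int) ≥ (k : Int) then total + ((run : Int) - (k : Int) + 1) else total)]
      rw [G_run_split run ch t' k hk hc]
      simp only [List.replicate_zero, List.nil_append]
      by_cases h : (run : Int) ≥ (k : Int)
      · rw [if_pos h]
        push_cast
        omega
      · rw [if_neg h]
        push_cast
        omega

-- A's sliding loop, run for b steps
theorem A_loop (l : List Char) (k : Nat) (hk : 1 ≤ k) (c0 : Int) :
    ∀ (b : Nat), b + k ≤ l.length →
    (PySem.List.pyRange 0 (b : Int) 1).foldl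
      (fun (st : Int × Int) i =>
        let s1 := if PySem.List.pyGetD l i ' ' = '1' then st.1 - 1 else st.1
        let s1 := if PySem.List.pyGetD l (i + (k : Int)) ' ' = '1' then s1 + 1 else s1
        let c  := if s1 = (k : Int) then st.2 + 1 else st.2
        (s1, c)) (((wc l k 0 : Nat) : Int), c0)
      = (((wc l k b : Nat) : Int),
         c0 + (((List.range b).countP (fun t => wc l k (t+1) = k) : Nat) : Int)) := by
  intro b
  induction b with
  | zero =>
    intro _
    rw [PySem.List.pyRange_one_eq_nil (by omega)]
    simp
  | succ b ih =>
    intro hb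
    have hb' : b + k ≤ l.length := by omega
    have hcast : ((b + 1 : Nat) : Int) = (b : Int) + 1 := by push_cast; ring
    rw [hcast, PySem.List.pyRange_one_succ_right (by omega), List.foldl_append, ih hb']
    simp only [List.foldl_cons, List.foldl_nil]
    have hg1 : PySem.List.pyGetD l (b : Int) ' ' = l.getD b ' ' :=
      PySem.List.pyGetD_natCast l b ' '
    have hg2 : PySem.List.pyGetD l ((b : Int) + (k : Int)) ' ' = l.getD (b + k) ' ' := by
      rw [show ((b : Int) + (k : Int)) = ((b + k : Nat) : Int) by push_cast; ring]
      exact PySem.List.pyGetD_natCast l (b + k) ' ' 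
    have hshift := wc_shift l k b hk (by omega)
    have hs1 : (if PySem.List.pyGetD l ((b : Int) + (k : Int)) ' ' = '1'
          then (if PySem.List.pyGetD l (b : Int) ' ' = '1'
                then ((wc l k b : Nat) : Int) - 1 else ((wc l k b : Nat) : Int)) + 1
          else (if PySem.List.pyGetD l (b : Int) ' ' = '1'
                then ((wc l k b : Nat) : Int) - 1 else ((wc l k b : Nat) : Int)))
        = ((wc l k (b+1) : Nat) : Int) := by
      rw [hg1, hg2, hshift]
      split_ifs <;> ring
    simp only [hg1, hg2] at hs1 ⊢
    rw [hs1]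
    have hcnd : (((wc l k (b+1) : Nat) : Int) = (k : Int)) ↔ (wc l k (b+1) = k) := by
      exact_mod_cast Iff.rfl
    rw [List.range_succ, List.countP_append]
    simp only [List.countP_cons, List.countP_nil]
    by_cases hw : wc l k (b+1) = k
    · rw [if_pos (by exact_mod_cast hw)]
      simp [hw]
      ring
    · rw [if_neg (by exact_mod_cast hw)]
      simp [hw]

-- the two candidate-window counts agree on the nw-prefix
theorem G_take (l : List Char) (k m : Nat) (hk : 1 ≤ k) (hkm : k ≤ m) (hm : m ≤ l.length) :
    G (l.take m) k
      = (if wc l k 0 = k then 1 else 0)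
        + (List.range (m - k)).countP (fun t => wc l k (t+1) = k) := by
  unfold G
  have hlen : (l.take m).length = m := by simp; omega
  have h1 : (l.take m).length + 1 - k = (m - k) + 1 := by omega
  rw [h1, List.range_succ_eq_map, List.countP_cons, List.countP_map]
  have hwin : ∀ j, j + k ≤ m → wc (l.take m) k j = wc l k j := by
    intro j hj
    have h : List.take k (List.drop j (List.take m l)) = List.take k (List.drop j l) := by
      rw [List.drop_take, List.take_take]
      congr 1
      omega
    unfold wc
    rw [h]
  have h2 : List.countP ((fun j => decide (wc (l.take m) k j = k)) ∘ Nat.succ)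
      (List.range (m - k)) = List.countP (fun t => decide (wc l k (t+1) = k))
      (List.range (m - k)) := by
    apply List.countP_congr
    intro j hj
    simp only [List.mem_range] at hj
    simp [Function.comp, hwin (j+1) (by omega)]
  rw [h2]
  have h0 : wc (l.take m) k 0 = wc l k 0 := hwin 0 (by omega)
  by_cases hw : wc l k 0 = k <;> simp [h0, hw] <;> omega

-- ===== VERDICT (by name: the statement is the Claim_ definition above) =====
theorem f_spec : Claim_equal_f := by
  intro x w nw hdom hpre
  unfold Spec_f f f_alt
  by_cases hx : x > nw
  · rw [if_pos hx, if_pos hx]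
  · rw [if_neg hx, if_neg hx]
    dsimp only
    have hxnw : x ≤ nw := by omega
    have hx1 : 1 ≤ x := by
      rcases hpre.1 with h | h
      · exact h
      · omega
    have hnw0 : 0 ≤ nw := by omega
    obtain ⟨k, rfl⟩ : ∃ k : Nat, x = (k : Int) := ⟨x.toNat, by omega⟩
    obtain ⟨m, rfl⟩ : ∃ m : Nat, nw = (m : Int) := ⟨nw.toNat, by omega⟩
    set l := w.toList with hl
    have hk1 : 1 ≤ k := by omega
    have hkm : k ≤ m := by omega
    have hslice : PySem.List.slice l none (some ((k : Nat) : Int)) = l.take k := by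
      rw [PySem.List.slice_to _ (by omega), Int.toNat_natCast]
    have hsliceB : PySem.List.slice l none (some ((m : Nat) : Int)) = l.take m := by
      rw [PySem.List.slice_to _ (by omega), Int.toNat_natCast]
    have hcnt : ((PySem.Chars.count (PySem.List.slice l none (some ((k : Nat) : Int))) ['1'] : Nat) : Int)
        = ((wc l k 0 : Nat) : Int) := by
      rw [hslice, chars_count_singleton]
      unfold wc
      rw [List.drop_zero]
    have hB := B_run k hk1 (l.take m) 0 0
    simp only [List.replicate_zero, List.nil_append, zero_add] at hB
    rw [Nat.cast_zero] at hB
    rw [hsliceB, hB, hcnt]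
    by_cases hlt : k < m
    · -- x < nw: full sliding loop; nw ≤ len(w)
      have hmlen : m ≤ l.length := by
        have h2 := hpre.2 (by exact_mod_cast Nat.cast_lt.mpr hlt)
        rw [← hl] at h2
        omega
      have hrange : ((m : Nat) : Int) - ((k : Nat) : Int) = ((m - k : Nat) : Int) := by omega
      rw [hrange]
      have hA := A_loop l k hk1 (if ((wc l k 0 : Nat) : Int) = ((k : Nat) : Int) then 0 + 1 else 0)
        (m - k) (by omega)
      rw [hA]
      have hGt := G_take l k m hk1 hkm hmlen
      rw [hGt]
      by_cases hw0 : wc l k 0 = k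
      · rw [if_pos (by exact_mod_cast hw0)]
        simp [hw0]
      · rw [if_neg (by exact_mod_cast hw0)]
        simp [hw0]
    · -- x = nw: no loop iterations; at most one window
      have hmk : m = k := by omega
      have hrange0 : ((m : Nat) : Int) - ((k : Nat) : Int) = 0 := by omega
      rw [hrange0, PySem.List.pyRange_one_eq_nil (by omega)]
      simp only [List.foldl_nil]
      have hGs : G (l.take m) k = if (l.take m).count '1' = k then 1 else 0 := by
        apply G_short
        have := List.length_take_le m l
        omega
      have hwc : wc l k 0 = (l.take m).count '1' := by
        unfold wc
        rw [List.drop_zero, hmk]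
      rw [hGs, ← hwc]
      by_cases hw0 : wc l k 0 = k
      · rw [if_pos (by exact_mod_cast hw0)]
        simp [hw0]
      · rw [if_neg (by exact_mod_cast hw0)]
        simp [hw0]
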